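-- pv_equiv track=rewrite | github.com/0neF0rA11/Algorithms | Yandex_1_0/Hw_6/D.py | calculate_protection_size
-- ===== SOURCE A (Python) =====
-- def calculate_protection_size(n, a, b, w, h):
--     left, right = 0, min(w, h)
--     while left < right:
--         size = (left + right + 1) // 2
--         if (w // (a + 2 * size)) * (h // (b + 2 * size)) >= n or \
--            (w // (b + 2 * size)) * (h // (a + 2 * size)) >= n:
--             left = size
--         else:
--             right = size -1
--
--     return left
-- ===== SOURCE B (Python) =====
-- def calculate_protection_size(n, a, b, w, h):
--     size = min(w, h)
--     while size >= 1:
--         if (w // (a + 2 * size)) * (h // (b + 2 * size)) >= n or \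
--            (w // (b + 2 * size)) * (h // (a + 2 * size)) >= n:
--             return size
--         size -= 1
--     return 0
-- ===== Notes on version B (the rewrite author's own statement) =====
-- stated objective: simpler
-- what changed: Replaces the bisection loop with a single descending linear scan that returns the first (hence largest) border size whose two-orientation fit predicate holds, with no left/right state.
-- outside the precondition, e.g. on calculate_protection_size(3, -7, -1, 5, 20): A returns 0, B returns 4; on calculate_protection_size(14, -4, 7, 5, 6): A returns 0, B raises ZeroDivisionError
import Mathlib
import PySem

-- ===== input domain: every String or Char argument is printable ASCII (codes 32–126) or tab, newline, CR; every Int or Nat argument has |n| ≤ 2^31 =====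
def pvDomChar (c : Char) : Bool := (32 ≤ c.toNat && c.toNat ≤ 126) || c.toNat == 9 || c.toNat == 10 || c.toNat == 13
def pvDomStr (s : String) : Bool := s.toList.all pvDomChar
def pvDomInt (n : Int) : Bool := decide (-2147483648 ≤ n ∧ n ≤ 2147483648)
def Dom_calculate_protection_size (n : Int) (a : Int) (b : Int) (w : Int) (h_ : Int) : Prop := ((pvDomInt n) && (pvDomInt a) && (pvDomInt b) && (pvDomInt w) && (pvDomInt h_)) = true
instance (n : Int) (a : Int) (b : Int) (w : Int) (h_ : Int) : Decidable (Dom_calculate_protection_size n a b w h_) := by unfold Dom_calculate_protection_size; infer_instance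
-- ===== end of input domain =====

-- B replaces the bisection by a single descending scan returning the first fitting size (simpler, no left/right state).

-- ===== PORT A =====
-- the two-orientation fit test, shared verbatim by both Pythons' if-conditions
def fitPred (n : Int) (a : Int) (b : Int) (w : Int) (h_ : Int) (size : Int) : Bool :=
  decide ((PySem.Int.floordiv w (a + 2 * size)) * (PySem.Int.floordiv h_ (b + 2 * size)) ≥ n) ||
  decide ((PySem.Int.floordiv w (b + 2 * size)) * (PySem.Int.floordiv h_ (a + 2 * size)) ≥ n)

-- A's while-loop over the (left, right) bisection state
def csLoopA (n : Int) (a : Int) (b : Int) (w : Int) (h_ : Int) (left : Int) (right : Int) : Int :=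
  if h : left < right then
    let size := PySem.Int.floordiv (left + right + 1) 2
    if fitPred n a b w h_ size then
      csLoopA n a b w h_ size right
    else
      csLoopA n a b w h_ left (size - 1)
  else left
termination_by (right - left).toNat
decreasing_by
  · have hb : left + 1 ≤ PySem.Int.floordiv ((left+1) + right) 2 ∧
        PySem.Int.floordiv ((left+1) + right) 2 ≤ right :=
      PySem.Int.floordiv_two_mid_bounds (by omega)
    have he : left + right + 1 = (left+1) + right := by ring
    simp only [he]
    omega
  · have hb : left + 1 ≤ PySem.Int.floordiv ((left+1) + right) 2 ∧
        PySem.Int.floordiv ((left+1) + right) 2 ≤ right :=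
      PySem.Int.floordiv_two_mid_bounds (by omega)
    have he : left + right + 1 = (left+1) + right := by ring
    simp only [he]
    omega

def calculate_protection_size (n : Int) (a : Int) (b : Int) (w : Int) (h_ : Int) : Int :=
  csLoopA n a b w h_ 0 (min w h_)

-- ===== PORT B =====
-- B's while-loop: scan size downward from min(w,h); first fitting size wins, else 0
def csScan (n : Int) (a : Int) (b : Int) (w : Int) (h_ : Int) (size : Int) : Int :=
  if h : 1 ≤ size then
    if fitPred n a b w h_ size then size
    else csScan n a b w h_ (size - 1)
  else 0
termination_by size.toNat
decreasing_by omega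

def calculate_protection_size_alt (n : Int) (a : Int) (b : Int) (w : Int) (h_ : Int) : Int :=
  csScan n a b w h_ (min w h_)

-- ===== PRECONDITION & SPEC =====
-- Pre_ excludes inputs with a negative border parameter (a < 0 or b < 0) while min(w,h) > 0: there the
-- divisor a+2*size (or b+2*size) can be zero or negative, so A can raise ZeroDivisionError, and where it
-- does return, its bisection over the then non-monotone predicate yields an accidental value.
def Pre_calculate_protection_size (n : Int) (a : Int) (b : Int) (w : Int) (h_ : Int) : Prop :=
  (0 ≤ a ∧ 0 ≤ b) ∨ min w h_ ≤ 0
instance (n : Int) (a : Int) (b : Int) (w : Int) (h_ : Int) : Decidable (Pre_calculate_protection_size n a b w h_) := by unfold Pre_calculate_protection_size; infer_instance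

def pvWitness_calculate_protection_size : Int × Int × Int × Int × Int := (3, 1, 1, 10, 10)

def Spec_calculate_protection_size (n : Int) (a : Int) (b : Int) (w : Int) (h_ : Int) (out : Int) : Prop := out = calculate_protection_size_alt n a b w h_
instance (n : Int) (a : Int) (b : Int) (w : Int) (h_ : Int) (out : Int) : Decidable (Spec_calculate_protection_size n a b w h_ out) := by unfold Spec_calculate_protection_size; infer_instance

-- ===== CLAIM (what is proved, stated in full; the proofs are below) =====
def Claim_equal_calculate_protection_size : Prop := ∀ (n : Int) (a : Int) (b : Int) (w : Int) (h_ : Int), Dom_calculate_protection_size n a b w h_ → Pre_calculate_protection_size n a b w h_ → Spec_calculate_protection_size n a b w h_ (calculate_protection_size n a b w h_)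

-- ===== LEMMAS AND PROOFS =====

-- antitonicity of the fit predicate on [1, hi]
def AntiOn (P : Int → Bool) (hi : Int) : Prop :=
  ∀ s t : Int, 1 ≤ t → t ≤ s → s ≤ hi → P s = true → P t = true

lemma div_anti (w c d : Int) (hw : 0 ≤ w) (hc : 0 < c) (hcd : c ≤ d) :
    PySem.Int.floordiv w d ≤ PySem.Int.floordiv w c := by
  have hd : 0 < d := lt_of_lt_of_le hc hcd
  rw [PySem.Int.floordiv_eq_ediv_of_pos hd, PySem.Int.floordiv_eq_ediv_of_pos hc]
  have h0 : 0 ≤ w / d := Int.ediv_nonneg hw (le_of_lt hd)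
  rw [Int.le_ediv_iff_mul_le hc]
  calc w / d * c ≤ w / d * d := mul_le_mul_of_nonneg_left hcd h0
    _ ≤ w := Int.ediv_mul_le w (by omega)

lemma div_nonneg' (w c : Int) (hw : 0 ≤ w) (hc : 0 < c) :
    0 ≤ PySem.Int.floordiv w c := by
  rw [PySem.Int.floordiv_eq_ediv_of_pos hc]
  exact Int.ediv_nonneg hw (le_of_lt hc)

lemma fit_anti (n a b w h_ : Int) (ha : 0 ≤ a) (hb : 0 ≤ b) :
    AntiOn (fitPred n a b w h_) (min w h_) := by
  intro s t ht hts hshi hPs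
  have hw : 0 ≤ w := le_trans (by omega) (le_trans hshi (min_le_left w h_))
  have hh : 0 ≤ h_ := le_trans (by omega) (le_trans hshi (min_le_right w h_))
  have key : ∀ x y : Int, 0 ≤ x → 0 ≤ y →
      n ≤ PySem.Int.floordiv w (x + 2 * s) * PySem.Int.floordiv h_ (y + 2 * s) →
      n ≤ PySem.Int.floordiv w (x + 2 * t) * PySem.Int.floordiv h_ (y + 2 * t) := by
    intro x y hx hy hns
    have h1 : PySem.Int.floordiv w (x + 2 * s) ≤ PySem.Int.floordiv w (x + 2 * t) :=
      div_anti w (x + 2 * t) (x + 2 * s) hw (by omega) (by omega)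
    have h2 : PySem.Int.floordiv h_ (y + 2 * s) ≤ PySem.Int.floordiv h_ (y + 2 * t) :=
      div_anti h_ (y + 2 * t) (y + 2 * s) hh (by omega) (by omega)
    have h3 : 0 ≤ PySem.Int.floordiv h_ (y + 2 * s) := div_nonneg' h_ _ hh (by omega)
    have h4 : 0 ≤ PySem.Int.floordiv w (x + 2 * t) := div_nonneg' w _ hw (by omega)
    exact le_trans hns (mul_le_mul h1 h2 h3 h4)
  unfold fitPred at hPs ⊢
  simp only [Bool.or_eq_true, decide_eq_true_eq, ge_iff_le] at hPs ⊢
  rcases hPs with hPs | hPs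
  · exact Or.inl (key a b ha hb hPs)
  · exact Or.inr (key b a hb ha hPs)

lemma scan_eq_zero (n a b w h_ : Int) : ∀ (k : Nat) (s : Int), s.toNat ≤ k →
    (∀ t, 1 ≤ t → t ≤ s → fitPred n a b w h_ t = false) →
    csScan n a b w h_ s = 0 := by
  intro k
  induction k with
  | zero =>
    intro s hs hall
    rw [csScan]
    have : ¬ (1 : Int) ≤ s := by omega
    simp [this]
  | succ k ih =>
    intro s hs hall
    by_cases h1 : 1 ≤ s
    · rw [csScan, dif_pos h1, if_neg (by simp [hall s h1 le_rfl])]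
      exact ih (s - 1) (by omega) (fun t ht1 ht2 => hall t ht1 (by omega))
    · rw [csScan, dif_neg h1]

lemma scan_eq_of (n a b w h_ : Int) : ∀ (k : Nat) (s m : Int), s.toNat ≤ k →
    1 ≤ m → m ≤ s → fitPred n a b w h_ m = true →
    (∀ t, m < t → t ≤ s → fitPred n a b w h_ t = false) →
    csScan n a b w h_ s = m := by
  intro k
  induction k with
  | zero => intro s m hs hm1 hms hP hup; omega
  | succ k ih =>
    intro s m hs hm1 hms hP hup
    have h1 : (1 : Int) ≤ s := by omega
    rw [csScan, dif_pos h1]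
    cases hF : fitPred n a b w h_ s with
    | true =>
      rw [if_pos rfl]
      rcases lt_or_eq_of_le hms with hlt | heq
      · exact absurd hF (by simp [hup s hlt le_rfl])
      · omega
    | false =>
      rw [if_neg (by simp)]
      have hms' : m ≤ s - 1 := by
        rcases lt_or_eq_of_le hms with hlt | heq
        · omega
        · exact absurd (heq ▸ hP) (by simp [hF])
      exact ih (s - 1) m (by omega) hm1 hms' hP (fun t ht1 ht2 => hup t ht1 (by omega))

lemma loop_eq (n a b w h_ hi : Int) (hanti : AntiOn (fitPred n a b w h_) hi) :
    ∀ (k : Nat) (left right : Int), (right - left).toNat ≤ k →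
    0 ≤ left → left ≤ right → right ≤ hi →
    (left = 0 ∨ (1 ≤ left ∧ fitPred n a b w h_ left = true)) →
    (∀ t, right < t → t ≤ hi → fitPred n a b w h_ t = false) →
    csLoopA n a b w h_ left right = csScan n a b w h_ hi := by
  intro k
  induction k with
  | zero =>
    intro left right hk h0 hlr hrhi hinv hup
    rw [csLoopA]
    have hnl : ¬ left < right := by omega
    simp only [hnl, dite_false]
    rcases hinv with h | ⟨h1, hP⟩
    · subst h
      exact (scan_eq_zero n a b w h_ hi.toNat hi le_rfl
        (fun t ht1 ht2 => hup t (by omega) ht2)).symm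
    · exact (scan_eq_of n a b w h_ hi.toNat hi left le_rfl h1 (by omega) hP
        (fun t ht1 ht2 => hup t (by omega) ht2)).symm
  | succ k ih =>
    intro left right hk h0 hlr hrhi hinv hup
    by_cases hlt : left < right
    · rw [csLoopA, dif_pos hlt]
      have hb : left + 1 ≤ PySem.Int.floordiv ((left+1) + right) 2 ∧
          PySem.Int.floordiv ((left+1) + right) 2 ≤ right :=
        PySem.Int.floordiv_two_mid_bounds (by omega)
      have he : left + right + 1 = (left+1) + right := by ring
      show (if fitPred n a b w h_ (PySem.Int.floordiv (left + right + 1) 2) then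
              csLoopA n a b w h_ (PySem.Int.floordiv (left + right + 1) 2) right
            else csLoopA n a b w h_ left (PySem.Int.floordiv (left + right + 1) 2 - 1))
          = csScan n a b w h_ hi
      rw [he]
      cases hfit : fitPred n a b w h_ (PySem.Int.floordiv ((left+1) + right) 2) with
      | true =>
        rw [if_pos rfl]
        exact ih _ right (by omega) (by omega) (by omega) hrhi
          (Or.inr ⟨by omega, hfit⟩) hup
      | false =>
        rw [if_neg (by simp)]
        refine ih left _ (by omega) h0 (by omega) (by omega) hinv ?_
        intro t ht1 ht2
        by_cases hc : right < t
        · exact hup t hc ht2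
        · cases hF : fitPred n a b w h_ t with
          | false => rfl
          | true =>
            exact absurd (hanti t (PySem.Int.floordiv ((left+1) + right) 2)
              (by omega) (by omega) (by omega) hF) (by rw [hfit]; simp)
    · rw [csLoopA, dif_neg hlt]
      rcases hinv with h | ⟨h1, hP⟩
      · subst h
        exact (scan_eq_zero n a b w h_ hi.toNat hi le_rfl
          (fun t ht1 ht2 => hup t (by omega) ht2)).symm
      · exact (scan_eq_of n a b w h_ hi.toNat hi left le_rfl h1 (by omega) hP
          (fun t ht1 ht2 => hup t (by omega) ht2)).symm

-- ===== VERDICT (by name: the statement is the Claim_ definition above) =====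
theorem calculate_protection_size_spec : Claim_equal_calculate_protection_size := by
  intro n a b w h_ hdom hpre
  unfold Spec_calculate_protection_size calculate_protection_size calculate_protection_size_alt
  by_cases hhi : min w h_ ≤ 0
  · rw [csLoopA, csScan]
    have hn1 : ¬ (0 : Int) < min w h_ := by omega
    have hn2 : ¬ (1 : Int) ≤ min w h_ := by omega
    simp [hn1, hn2]
  · have hab : 0 ≤ a ∧ 0 ≤ b := by
      rcases hpre with h | h
      · exact h
      · omega
    exact loop_eq n a b w h_ (min w h_) (fit_anti n a b w h_ hab.1 hab.2)
      (min w h_).toNat 0 (min w h_) (by omega) le_rfl (by omega) le_rfl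
      (Or.inl rfl) (fun t ht1 ht2 => absurd ht2 (by omega))
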